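-- pv_equiv track=rewrite | github.com/OmarRash/Algorithmic-Toolbox-course | fibonacci_partial_sum.py | calc_fib_huge
-- ===== SOURCE A (Python) =====
-- def calc_fib_huge(n,m):
--     a = []
--     b = []
--     a.append(0)
--     a.append(1)
--     b.append(0)
--     b.append(1)
--     if n >m :
--         n,m=m,n
--     for i in range(2, n + 3):
--         a.append(a[i - 1]+a[i - 2])
--
--     for i in range(2, m + 3):
--         b.append(b[i - 1] + b[i - 2])
--     if n==m :
--         return a[n] % 10
--     return ((b[m+2]-1)-(a[n+1]-1))%10
-- ===== SOURCE B (Python) =====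
-- FIB10 = [0, 1, 1, 2, 3, 5, 8, 3, 1, 4, 5, 9, 4, 3, 7, 0, 7, 7, 4, 1, 5, 6, 1, 7, 8, 5, 3, 8, 1, 9, 0, 9, 9, 8, 7, 5, 2, 7, 9, 6, 5, 1, 6, 7, 3, 0, 3, 3, 6, 9, 5, 4, 9, 3, 2, 5, 7, 2, 9, 1]
--
--
-- def calc_fib_huge(n, m):
--     if n > m:
--         n, m = m, n
--     return (FIB10[(m + 2) % 60] - FIB10[(n + 1) % 60]) % 10
-- ===== Notes on version B (the rewrite author's own statement) =====
-- stated objective: faster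
-- what changed: Replaces the two O(m) big-integer Fibonacci list builds with a fixed 60-entry Pisano-period table of Fibonacci values mod 10 and the partial-sum identity sum F_n..F_m = F_{m+2} - F_{n+1}, making the answer an O(1) table lookup.
-- outside the precondition, e.g. on calc_fib_huge(-3, 5): A returns 3, B returns 4; on calc_fib_huge(-2, -2): A returns 0, B returns 9; on calc_fib_huge(-4, 5): A raises IndexError, B returns 1
import Mathlib
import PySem

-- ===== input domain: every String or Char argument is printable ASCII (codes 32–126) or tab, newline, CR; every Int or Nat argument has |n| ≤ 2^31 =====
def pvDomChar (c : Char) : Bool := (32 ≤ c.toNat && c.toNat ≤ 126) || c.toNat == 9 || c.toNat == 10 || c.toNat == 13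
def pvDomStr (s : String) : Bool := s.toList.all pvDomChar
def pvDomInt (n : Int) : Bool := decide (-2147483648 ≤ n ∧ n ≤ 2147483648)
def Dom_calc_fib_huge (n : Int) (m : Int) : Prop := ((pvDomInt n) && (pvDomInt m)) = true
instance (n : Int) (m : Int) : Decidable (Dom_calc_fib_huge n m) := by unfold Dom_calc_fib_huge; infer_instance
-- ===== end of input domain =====

-- B replaces A's two O(m) big-integer Fibonacci list builds by an O(1) lookup in a
-- fixed 60-entry Pisano-period table of Fibonacci numbers mod 10 (objective: faster, asymptotic).

-- ===== PORT A =====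
-- the loop body 'a.append(a[i-1] + a[i-2])'; indices are in range for every i produced
-- by the loop (i = 2 .. len), so pyGetD's default is never used there
def fibStep (acc : List Int) (i : Int) : List Int :=
  acc ++ [PySem.List.pyGetD acc (i - 1) 0 + PySem.List.pyGetD acc (i - 2) 0]

def calc_fib_huge (n : Int) (m : Int) : Int :=
  let a0 : List Int := [0, 1]
  let b0 : List Int := [0, 1]
  let nm := if n > m then (m, n) else (n, m)
  let nn := nm.1
  let mm := nm.2
  let a := (PySem.List.pyRange 2 (nn + 3) 1).foldl fibStep a0
  let b := (PySem.List.pyRange 2 (mm + 3) 1).foldl fibStep b0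
  if nn = mm then PySem.Int.mod (PySem.List.pyGetD a nn 0) 10
  else PySem.Int.mod ((PySem.List.pyGetD b (mm + 2) 0 - 1) - (PySem.List.pyGetD a (nn + 1) 0 - 1)) 10

-- ===== PORT B =====
def FIB10 : List Int :=
  [0, 1, 1, 2, 3, 5, 8, 3, 1, 4, 5, 9, 4, 3, 7, 0, 7, 7, 4, 1, 5, 6, 1, 7, 8, 5, 3, 8, 1, 9,
   0, 9, 9, 8, 7, 5, 2, 7, 9, 6, 5, 1, 6, 7, 3, 0, 3, 3, 6, 9, 5, 4, 9, 3, 2, 5, 7, 2, 9, 1]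

def calc_fib_huge_alt (n : Int) (m : Int) : Int :=
  let nm := if n > m then (m, n) else (n, m)
  let nn := nm.1
  let mm := nm.2
  PySem.Int.mod
    (PySem.List.pyGetD FIB10 (PySem.Int.mod (mm + 2) 60) 0
      - PySem.List.pyGetD FIB10 (PySem.Int.mod (nn + 1) 60) 0) 10

-- ===== PRECONDITION & SPEC =====
-- Pre_ excludes negative n or m: A's list indexing then either raises IndexError or
-- relies on accidental negative-index wraparound into the seed list [0, 1].
def Pre_calc_fib_huge (n : Int) (m : Int) : Prop := 0 ≤ n ∧ 0 ≤ m
instance (n : Int) (m : Int) : Decidable (Pre_calc_fib_huge n m) := by unfold Pre_calc_fib_huge; infer_instance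
def pvWitness_calc_fib_huge : Int × Int := (3, 7)

def Spec_calc_fib_huge (n : Int) (m : Int) (out : Int) : Prop := out = calc_fib_huge_alt n m
instance (n : Int) (m : Int) (out : Int) : Decidable (Spec_calc_fib_huge n m out) := by unfold Spec_calc_fib_huge; infer_instance

-- ===== CLAIM (what is proved, stated in full; the proofs are below) =====
def Claim_equal_calc_fib_huge : Prop := ∀ (n : Int) (m : Int), Dom_calc_fib_huge n m → Pre_calc_fib_huge n m → Spec_calc_fib_huge n m (calc_fib_huge n m)

-- ===== LEMMAS AND PROOFS =====

-- exact (big-integer) Fibonacci numbers, as A computes them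
def fibI : Nat → Int
  | 0 => 0
  | 1 => 1
  | k + 2 => fibI k + fibI (k + 1)

theorem getD_map_range (f : Nat → Int) (n k : Nat) (h : k < n) :
    ((List.range n).map f).getD k 0 = f k := by
  simp [List.getD, h]

-- A's loop builds exactly the list [F 0, …, F (j+2)]
theorem buildA (j : Nat) :
    (PySem.List.pyRange 2 ((j : Int) + 3) 1).foldl fibStep [0, 1]
      = (List.range (j + 3)).map fibI := by
  induction j with
  | zero => decide
  | succ j ih =>
    have h3 : ((j + 1 : Nat) : Int) + 3 = ((j : Int) + 3) + 1 := by push_cast; ring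
    rw [h3, PySem.List.pyRange_one_succ_right (by omega), List.foldl_append, ih]
    show fibStep _ _ = _
    unfold fibStep
    have h1 : ((j : Int) + 3) - 1 = ((j + 2 : Nat) : Int) := by push_cast; ring
    have h2 : ((j : Int) + 3) - 2 = ((j + 1 : Nat) : Int) := by push_cast; ring
    rw [h1, h2, PySem.List.pyGetD_natCast, PySem.List.pyGetD_natCast,
      getD_map_range _ _ _ (by omega), getD_map_range _ _ _ (by omega)]
    conv_rhs => rw [show j + 1 + 3 = (j + 3) + 1 from by omega, List.range_succ, List.map_append]
    congr 1
    show _ = [fibI (j + 3)]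
    rw [show fibI (j + 3) = fibI (j + 1) + fibI (j + 2) from rfl]
    rw [Int.add_comm]

-- Pisano period 60: F k mod 10 is the table entry at k % 60
theorem per (k : Nat) : fibI k % 10 = FIB10.getD (k % 60) 0 := by
  induction k using Nat.strong_induction_on with
  | _ k ih =>
    match k with
    | 0 => decide
    | 1 => decide
    | (k + 2) =>
      have h1 := ih k (by omega)
      have h2 := ih (k + 1) (by omega)
      have hstep : fibI (k + 2) % 10 = (fibI k % 10 + fibI (k + 1) % 10) % 10 := by
        show (fibI k + fibI (k + 1)) % 10 = _
        rw [Int.add_emod]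
      have hr2 : (k + 2) % 60 = (k % 60 + 2) % 60 := by omega
      have hr1 : (k + 1) % 60 = (k % 60 + 1) % 60 := by omega
      have htab : ∀ r < 60, (FIB10.getD r 0 + FIB10.getD ((r + 1) % 60) 0) % 10
          = FIB10.getD ((r + 2) % 60) 0 := by decide
      rw [hstep, h1, h2, hr1, hr2]
      exact htab (k % 60) (Nat.mod_lt _ (by omega))

-- spell out B's lookup on a Nat argument
theorem lookup_eq (k : Nat) :
    PySem.List.pyGetD FIB10 (PySem.Int.mod ((k : Nat) : Int) 60) 0 = FIB10.getD (k % 60) 0 := by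
  rw [show (60 : Int) = ((60 : Nat) : Int) from rfl, PySem.Int.mod_natCast,
    PySem.List.pyGetD_natCast]

-- the post-swap bodies agree, for any pair of naturals
theorem core (p q : Nat) :
    (let a := (PySem.List.pyRange 2 ((p : Int) + 3) 1).foldl fibStep ([0, 1] : List Int)
     let b := (PySem.List.pyRange 2 ((q : Int) + 3) 1).foldl fibStep ([0, 1] : List Int)
     if (p : Int) = (q : Int) then PySem.Int.mod (PySem.List.pyGetD a (p : Int)  0) 10
     else PySem.Int.mod ((PySem.List.pyGetD b ((q : Int) + 2) 0 - 1) - (PySem.List.pyGetD a ((p : Int) + 1) 0 - 1)) 10)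
    = PySem.Int.mod
        (PySem.List.pyGetD FIB10 (PySem.Int.mod ((q : Int) + 2) 60) 0
          - PySem.List.pyGetD FIB10 (PySem.Int.mod ((p : Int) + 1) 60) 0) 10 := by
  have hq2 : ((q : Int) + 2) = ((q + 2 : Nat) : Int) := by push_cast; ring
  have hp1 : ((p : Int) + 1) = ((p + 1 : Nat) : Int) := by push_cast; ring
  have me : ∀ a : Int, PySem.Int.mod a 10 = a % 10 := fun a => PySem.Int.mod_eq_emod_of_pos (by omega)
  simp only [buildA p, buildA q]
  rw [hq2, hp1, lookup_eq, lookup_eq]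
  by_cases hpq : (p : Int) = (q : Int)
  · rw [if_pos hpq]
    have hpqn : p = q := by exact_mod_cast hpq
    subst hpqn
    simp only [me]
    rw [PySem.List.pyGetD_natCast, getD_map_range _ _ _ (by omega), ← per, ← per]
    conv_rhs => rw [← Int.sub_emod]
    rw [show fibI (p + 2) - fibI (p + 1) = fibI p from by
      rw [show fibI (p + 2) = fibI p + fibI (p + 1) from rfl]; ring]
  · rw [if_neg hpq]
    simp only [me]
    rw [PySem.List.pyGetD_natCast, PySem.List.pyGetD_natCast,
      getD_map_range _ _ _ (by omega), getD_map_range _ _ _ (by omega), ← per, ← per]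
    conv_rhs => rw [← Int.sub_emod]
    congr 1
    ring

-- ===== VERDICT (by name: the statement is the Claim_ definition above) =====
theorem calc_fib_huge_spec : Claim_equal_calc_fib_huge := by
  intro n m _ hpre
  unfold Spec_calc_fib_huge calc_fib_huge calc_fib_huge_alt
  obtain ⟨hn, hm⟩ := hpre
  by_cases h : n > m
  · simp only [if_pos h]
    lift m to ℕ using hm
    lift n to ℕ using hn
    exact core m n
  · simp only [if_neg h]
    lift n to ℕ using hn
    lift m to ℕ using hm
    exact core n m
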